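-- pv_equiv track=rewrite | github.com/TobiasAsk/advent-of-code | 2023/day_18/solution.py | get_lagoon_map
-- ===== SOURCE A (Python) =====
-- def get_lagoon_map(trench):
--     width = max(x for x, _ in trench) + 1
--     height = max(y for _, y in trench) + 1
--     lagoon_map = []
--     for y in range(height):
--         lagoon_map.append(''.join('#' if (x, y) in trench else '.'
--                                   for x in range(width)))
--     return lagoon_map
-- ===== SOURCE B (Python) =====
-- def get_lagoon_map(trench):
--     width = max(x for x, _ in trench) + 1
--     height = max(y for _, y in trench) + 1
--     grid = [['.'] * width for _ in range(height)]
--     for x, y in trench: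
--         if 0 <= x < width and 0 <= y < height:
--             grid[y][x] = '#'
--     return [''.join(row) for row in grid]
-- ===== Notes on version B (the rewrite author's own statement) =====
-- stated objective: faster
-- what changed: B scatters each trench point once into a prebuilt height x width grid of '.' characters instead of querying 'point in trench' (a linear list scan) for every cell of the grid.
import Mathlib
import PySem

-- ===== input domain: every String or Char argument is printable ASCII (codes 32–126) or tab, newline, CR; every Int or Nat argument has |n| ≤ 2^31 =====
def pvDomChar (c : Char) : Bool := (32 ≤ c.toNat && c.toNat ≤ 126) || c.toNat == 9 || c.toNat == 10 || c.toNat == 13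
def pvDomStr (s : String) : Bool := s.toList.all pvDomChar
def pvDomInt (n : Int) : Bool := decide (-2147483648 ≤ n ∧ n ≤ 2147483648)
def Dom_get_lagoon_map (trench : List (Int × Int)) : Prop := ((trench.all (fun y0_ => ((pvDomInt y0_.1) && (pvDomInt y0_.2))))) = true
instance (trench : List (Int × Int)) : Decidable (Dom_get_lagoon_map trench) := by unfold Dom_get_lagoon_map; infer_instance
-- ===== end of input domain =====

-- B scatters each trench point once into a prebuilt grid of '.' rows instead of testing
-- list membership for every cell (objective: faster, O(W*H + n) vs O(W*H*n)).

-- ===== PORT A =====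
def get_lagoon_map (trench : List (Int × Int)) : List String :=
  match PySem.List.max? (trench.map (fun p => p.1)) (fun x => x),
        PySem.List.max? (trench.map (fun p => p.2)) (fun x => x) with
  | some mx, some my =>
      let width : Int := mx + 1
      let height : Int := my + 1
      (PySem.List.pyRange 0 height 1).map (fun y =>
        String.mk ((PySem.List.pyRange 0 width 1).map (fun x =>
          if (x, y) ∈ trench then '#' else '.')))
  | _, _ => []  -- unreachable under Pre_: Python raises ValueError (max of empty sequence)

-- ===== PORT B =====
-- one scatter step of Source B's loop: plot p into the grid if it is in bounds
def pvStep (width height : Int) (g : List (List Char)) (p : Int × Int) : List (List Char) :=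
  if 0 ≤ p.1 ∧ p.1 < width ∧ 0 ≤ p.2 ∧ p.2 < height then
    g.set p.2.toNat ((g.getD p.2.toNat []).set p.1.toNat '#')
  else g

def get_lagoon_map_alt (trench : List (Int × Int)) : List String :=
  match PySem.List.max? (trench.map (fun p => p.1)) (fun x => x) with
  | none => []  -- unreachable under Pre_: Source B raises ValueError here too
  | some mx =>
    match PySem.List.max? (trench.map (fun p => p.2)) (fun x => x) with
    | none => []
    | some my =>
        let width : Int := mx + 1
        let height : Int := my + 1
        let grid0 : List (List Char) := List.replicate height.toNat (List.replicate width.toNat '.')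
        let grid := trench.foldl (pvStep width height) grid0
        grid.map (fun row => String.mk row)

-- ===== PRECONDITION & SPEC =====
-- Pre_ excludes exactly the empty trench, on which Python A raises ValueError (max of empty sequence).
def Pre_get_lagoon_map (trench : List (Int × Int)) : Prop := trench ≠ []
instance (trench : List (Int × Int)) : Decidable (Pre_get_lagoon_map trench) := by
  unfold Pre_get_lagoon_map; infer_instance
def pvWitness_get_lagoon_map : (List (Int × Int)) := [(1, 0), (0, 1)]

def Spec_get_lagoon_map (trench : List (Int × Int)) (out : List String) : Prop := out = get_lagoon_map_alt trench
instance (trench : List (Int × Int)) (out : List String) : Decidable (Spec_get_lagoon_map trench out) := by unfold Spec_get_lagoon_map; infer_instance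

-- ===== CLAIM (what is proved, stated in full; the proofs are below) =====
def Claim_equal_get_lagoon_map : Prop := ∀ (trench : List (Int × Int)), Dom_get_lagoon_map trench → Pre_get_lagoon_map trench → Spec_get_lagoon_map trench (get_lagoon_map trench)

-- ===== LEMMAS AND PROOFS =====

theorem pvStep_length (W H : Int) (g : List (List Char)) (p : Int × Int) :
    (pvStep W H g p).length = g.length := by
  unfold pvStep; split <;> simp

theorem pvFold_length (W H : Int) (t : List (Int × Int)) (g : List (List Char)) :
    (t.foldl (pvStep W H) g).length = g.length := by
  induction t generalizing g with
  | nil => rfl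
  | cons p t ih => rw [List.foldl_cons, ih, pvStep_length]

theorem pvStep_rowlen (W H : Int) (g : List (List Char)) (p : Int × Int) (j : Nat) :
    ((pvStep W H g p)[j]?.getD []).length = (g[j]?.getD []).length := by
  unfold pvStep
  split
  · rw [List.getElem?_set]
    split_ifs with h1 h2
    · subst h1
      rw [List.getElem?_eq_getElem h2]
      simp [List.getD_eq_getElem?_getD, List.getElem?_eq_getElem h2]
    · rw [List.getElem?_eq_none (by omega)]
    · rfl
  · rfl

theorem pvFold_rowlen (W H : Int) (t : List (Int × Int)) (g : List (List Char)) (j : Nat) :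
    ((t.foldl (pvStep W H) g)[j]?.getD []).length = (g[j]?.getD []).length := by
  induction t generalizing g with
  | nil => rfl
  | cons p t ih => rw [List.foldl_cons, ih, pvStep_rowlen]

theorem pvStep_cell (W H : Int) (g : List (List Char)) (p : Int × Int) (ry cx : Nat)
    (hry : ry < g.length) (hcx : cx < (g[ry]?.getD []).length) :
    ((pvStep W H g p)[ry]?.getD [])[cx]?.getD '?' =
      if p = ((cx : Int), (ry : Int)) ∧ (cx : Int) < W ∧ (ry : Int) < H then '#'
      else (g[ry]?.getD [])[cx]?.getD '?' := by
  obtain ⟨px, py⟩ := p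
  unfold pvStep
  split
  · rename_i hb
    simp only at hb
    obtain ⟨hx0, hxW, hy0, hyH⟩ := hb
    by_cases hrow : py.toNat = ry
    · rw [List.getElem?_set, if_pos hrow, if_pos (hrow ▸ hry)]
      simp only [Option.getD_some]
      have hgetrow : (g.getD py.toNat [] : List Char) = g[ry]?.getD [] := by
        rw [List.getD_eq_getElem?_getD, hrow]
      rw [hgetrow]
      by_cases hcol : px.toNat = cx
      · rw [List.getElem?_set, if_pos hcol, if_pos (hcol ▸ hcx), Option.getD_some]
        have hpx : px = (cx : Int) := by omega
        have hpy : py = (ry : Int) := by omega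
        rw [if_pos ⟨by rw [hpx, hpy], by omega, by omega⟩]
      · rw [List.getElem?_set, if_neg hcol, if_neg]
        rintro ⟨heq, -⟩
        have h1 : px = (cx : Int) := (Prod.mk.injEq .. ▸ heq).1
        exact hcol (by omega)
    · rw [List.getElem?_set, if_neg hrow, if_neg]
      rintro ⟨heq, -⟩
      have h2 : py = (ry : Int) := (Prod.mk.injEq .. ▸ heq).2
      exact hrow (by omega)
  · rename_i hb
    simp only [not_and_or, not_le, not_lt] at hb
    rw [if_neg]
    rintro ⟨heq, hW', hH'⟩
    have h1 : px = (cx : Int) := (Prod.mk.injEq .. ▸ heq).1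
    have h2 : py = (ry : Int) := (Prod.mk.injEq .. ▸ heq).2
    rcases hb with h | h | h | h <;> omega

theorem pvFold_cell (W H : Int) (t : List (Int × Int)) (g : List (List Char)) (ry cx : Nat)
    (hry : ry < g.length) (hcx : cx < (g[ry]?.getD []).length) :
    ((t.foldl (pvStep W H) g)[ry]?.getD [])[cx]?.getD '?' =
      if ((cx : Int), (ry : Int)) ∈ t ∧ (cx : Int) < W ∧ (ry : Int) < H then '#'
      else (g[ry]?.getD [])[cx]?.getD '?' := by
  induction t generalizing g with
  | nil => simp
  | cons p t ih =>
    have hry' : ry < (pvStep W H g p).length := by rw [pvStep_length]; exact hry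
    have hcx' : cx < ((pvStep W H g p)[ry]?.getD []).length := by
      rw [pvStep_rowlen]; exact hcx
    rw [List.foldl_cons, ih (pvStep W H g p) hry' hcx', pvStep_cell W H g p ry cx hry hcx]
    by_cases hmem : ((cx : Int), (ry : Int)) ∈ t ∧ (cx : Int) < W ∧ (ry : Int) < H
    · rw [if_pos hmem, if_pos ⟨List.mem_cons_of_mem p hmem.1, hmem.2⟩]
    · rw [if_neg hmem]
      by_cases hp : p = ((cx : Int), (ry : Int)) ∧ (cx : Int) < W ∧ (ry : Int) < H
      · rw [if_pos hp, if_pos ⟨hp.1 ▸ List.mem_cons_self .., hp.2⟩]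
      · rw [if_neg hp, if_neg]
        rintro ⟨hmem2, hb⟩
        rcases List.mem_cons.mp hmem2 with h | h
        · exact hp ⟨h.symm, hb⟩
        · exact hmem ⟨h, hb⟩

-- B's finished row i equals the row A builds by probing membership for each x
theorem pvRow_eq (trench : List (Int × Int)) (W H : Int) (i : Nat) (hiH : i < H.toNat) :
    ((trench.foldl (pvStep W H)
        (List.replicate H.toNat (List.replicate W.toNat '.')))[i]?.getD []) =
      (PySem.List.pyRange 0 W 1).map (fun x => if (x, (i : Int)) ∈ trench then '#' else '.') := by
  have hrow0 : ((List.replicate H.toNat (List.replicate W.toNat '.')) :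
      List (List Char))[i]?.getD [] = List.replicate W.toNat '.' := by
    rw [List.getElem?_replicate, if_pos hiH, Option.getD_some]
  have hlen : ((trench.foldl (pvStep W H)
      (List.replicate H.toNat (List.replicate W.toNat '.')))[i]?.getD []).length = W.toNat := by
    rw [pvFold_rowlen, hrow0, List.length_replicate]
  apply List.ext_getElem?
  intro j
  by_cases hjW : j < W.toNat
  · have hcell := pvFold_cell W H trench (List.replicate H.toNat (List.replicate W.toNat '.')) i j
      (by rw [List.length_replicate]; exact hiH) (by rw [hrow0, List.length_replicate]; exact hjW)
    rw [List.getElem?_eq_getElem (show j < _ by rw [hlen]; exact hjW), Option.getD_some] at hcell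
    rw [List.getElem?_eq_getElem (show j < _ by rw [hlen]; exact hjW)]
    rw [List.getElem?_map, PySem.List.getElem?_pyRange_one, if_pos (by omega), Option.map_some]
    rw [hcell, zero_add]
    by_cases hmem : ((j : Int), (i : Int)) ∈ trench
    · rw [if_pos ⟨hmem, by omega, by omega⟩, if_pos hmem]
    · rw [if_neg (by rintro ⟨h, -⟩; exact hmem h), if_neg hmem, hrow0]
      rw [List.getElem?_replicate, if_pos hjW, Option.getD_some]
  · rw [List.getElem?_eq_none (by omega), List.getElem?_eq_none]
    simp only [List.length_map, PySem.List.length_pyRange_one]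
    omega

-- ===== VERDICT (by name: the statement is the Claim_ definition above) =====
theorem get_lagoon_map_spec : Claim_equal_get_lagoon_map := by
  intro trench _ hpre
  unfold Pre_get_lagoon_map at hpre
  unfold Spec_get_lagoon_map get_lagoon_map get_lagoon_map_alt
  cases hmx : PySem.List.max? (trench.map (fun p => p.1)) (fun x => x) with
  | none =>
    exact absurd (by simpa using (PySem.List.max?_eq_none_iff _ _).mp hmx) hpre
  | some mx =>
  cases hmy : PySem.List.max? (trench.map (fun p => p.2)) (fun x => x) with
  | none =>
    exact absurd (by simpa using (PySem.List.max?_eq_none_iff _ _).mp hmy) hpre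
  | some my =>
  simp only
  apply List.ext_getElem?
  intro i
  rw [List.getElem?_map, List.getElem?_map, PySem.List.getElem?_pyRange_one]
  by_cases hiH : i < (my + 1 - 0).toNat
  · have hfl : i < (trench.foldl (pvStep (mx + 1) (my + 1))
        (List.replicate (my + 1).toNat (List.replicate (mx + 1).toNat '.'))).length := by
      rw [pvFold_length, List.length_replicate]; omega
    rw [if_pos hiH, List.getElem?_eq_getElem hfl, Option.map_some, Option.map_some]
    have hrow := pvRow_eq trench (mx + 1) (my + 1) i (by omega)
    rw [List.getElem?_eq_getElem hfl, Option.getD_some] at hrow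
    rw [hrow, zero_add]
  · rw [if_neg hiH, Option.map_none, List.getElem?_eq_none, Option.map_none]
    rw [pvFold_length, List.length_replicate]; omega
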